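-- pv_equiv track=rewrite | github.com/GabiNeme/orca-divpes | src/carreira.py | _letra_maxima_para_nivel
-- ===== SOURCE A (Python) =====
-- def _letra_maxima_para_nivel(numero_nivel: int) -> str:
--     """Retorna a máxima letra que é possível ter para um determinado nível."""
--
--     transicao_para_letra = [
--         (1, "A"),
--         (7, "B"),
--         (13, "C"),
--         (19, "D"),
--         (25, "E"),
--     ]
--
--     for i in reversed(range(len(transicao_para_letra))):
--         if transicao_para_letra[i][0] <= numero_nivel:
--             return transicao_para_letra[i][1]
-- ===== SOURCE B (Python) =====
-- def _letra_maxima_para_nivel(numero_nivel: int) -> str: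
--     """Retorna a máxima letra que é possível ter para um determinado nível."""
--     if numero_nivel < 1:
--         return None
--     return "ABCDE"[min((numero_nivel - 1) // 6, 4)]
-- ===== Notes on version B (the rewrite author's own statement) =====
-- stated objective: simpler
-- what changed: Replaces the reversed scan over the threshold table by a closed-form index computation min((n-1)//6, 4) into 'ABCDE', exploiting the constant step of 6 between thresholds.
-- outside the precondition, e.g. on _letra_maxima_para_nivel(0): A returns None, B returns None
import Mathlib
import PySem

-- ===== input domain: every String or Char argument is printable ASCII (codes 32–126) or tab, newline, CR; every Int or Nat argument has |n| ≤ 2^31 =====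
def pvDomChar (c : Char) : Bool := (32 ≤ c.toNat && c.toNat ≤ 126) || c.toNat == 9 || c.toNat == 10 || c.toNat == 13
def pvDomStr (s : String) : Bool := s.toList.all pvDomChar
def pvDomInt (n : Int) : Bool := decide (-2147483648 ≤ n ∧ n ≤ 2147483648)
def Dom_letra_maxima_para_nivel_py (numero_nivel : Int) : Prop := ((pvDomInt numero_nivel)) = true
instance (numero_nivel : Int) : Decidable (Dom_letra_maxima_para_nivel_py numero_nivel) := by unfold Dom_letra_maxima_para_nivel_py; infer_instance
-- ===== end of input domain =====

-- B replaces A's reversed scan over the threshold table by the closed-form index min((n-1)//6, 4) into "ABCDE" (simpler).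


-- ===== PORT A =====
-- for i in reversed(range(len(t))): if t[i][0] <= n: return t[i][1]
def pvALoop (numero_nivel : Int) (t : List (Int × String)) : List Int → Option String
  | [] => none
  | i :: rest =>
    match PySem.List.pyGet? t i with
    | some p => if p.1 ≤ numero_nivel then some p.2 else pvALoop numero_nivel t rest
    | none => none

def letra_maxima_para_nivel_py (numero_nivel : Int) : String :=
  let transicao_para_letra : List (Int × String) :=
    [(1, "A"), (7, "B"), (13, "C"), (19, "D"), (25, "E")]
  -- the Python implicitly returns None when no threshold matches; Pre_ excludes that, "" is a placeholder
  (pvALoop numero_nivel transicao_para_letra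
    ((PySem.List.pyRange 0 transicao_para_letra.length 1).reverse)).getD ""

-- ===== PORT B =====
def letra_maxima_para_nivel_py_alt (numero_nivel : Int) : String :=
  if numero_nivel < 1 then ""  -- Python returns None here; excluded by Pre_
  else
    match PySem.Str.pyGet? "ABCDE" (min (PySem.Int.floordiv (numero_nivel - 1) 6) 4) with
    | some c => String.ofList [c]   -- "ABCDE"[idx] is a one-character str
    | none => ""

-- ===== PRECONDITION & SPEC =====
-- Pre_ excludes numero_nivel < 1, where A falls through the loop and returns None — not a value of the declared type str.
def Pre_letra_maxima_para_nivel_py (numero_nivel : Int) : Prop := 1 ≤ numero_nivel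
instance (numero_nivel : Int) : Decidable (Pre_letra_maxima_para_nivel_py numero_nivel) := by unfold Pre_letra_maxima_para_nivel_py; infer_instance
def pvWitness_letra_maxima_para_nivel_py : Int := 8

def Spec_letra_maxima_para_nivel_py (numero_nivel : Int) (out : String) : Prop := out = letra_maxima_para_nivel_py_alt numero_nivel
instance (numero_nivel : Int) (out : String) : Decidable (Spec_letra_maxima_para_nivel_py numero_nivel out) := by unfold Spec_letra_maxima_para_nivel_py; infer_instance

-- ===== CLAIM (what is proved, stated in full; the proofs are below) =====
def Claim_equal_letra_maxima_para_nivel_py : Prop := ∀ (numero_nivel : Int), Dom_letra_maxima_para_nivel_py numero_nivel → Pre_letra_maxima_para_nivel_py numero_nivel → Spec_letra_maxima_para_nivel_py numero_nivel (letra_maxima_para_nivel_py numero_nivel)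

-- ===== LEMMAS AND PROOFS =====

theorem pvB_eval (n : Int) (h1 : 1 ≤ n) :
    letra_maxima_para_nivel_py_alt n =
      if n < 7 then "A" else if n < 13 then "B" else if n < 19 then "C"
      else if n < 25 then "D" else "E" := by
  have h6 : (0:Int) < 6 := by omega
  unfold letra_maxima_para_nivel_py_alt
  rw [if_neg (by omega), PySem.Int.floordiv_eq_ediv_of_pos h6]
  split_ifs with h7 h13 h19 h25
  · have : (n - 1) / 6 = 0 := by omega
    simp [this, PySem.Str.pyGet?]
  · have : (n - 1) / 6 = 1 := by omega
    simp [this, PySem.Str.pyGet?]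
  · have : (n - 1) / 6 = 2 := by omega
    simp [this, PySem.Str.pyGet?]
  · have : (n - 1) / 6 = 3 := by omega
    simp [this, PySem.Str.pyGet?]
  · have h4 : min ((n - 1) / 6) 4 = 4 := by
      have : 4 ≤ (n - 1) / 6 := by omega
      omega
    simp [h4, PySem.Str.pyGet?]

theorem pvA_eval (n : Int) (h1 : 1 ≤ n) :
    letra_maxima_para_nivel_py n =
      if n < 7 then "A" else if n < 13 then "B" else if n < 19 then "C"
      else if n < 25 then "D" else "E" := by
  have hr : ((PySem.List.pyRange 0
      ([((1:Int), "A"), (7, "B"), (13, "C"), (19, "D"), (25, "E")]).length 1).reverse)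
      = [4, 3, 2, 1, 0] := by decide
  simp only [letra_maxima_para_nivel_py, hr]
  norm_num [pvALoop, PySem.List.pyGet?, PySem.List.pyIdx?,
    (by decide : Int.toNat 4 = 4), (by decide : Int.toNat 3 = 3),
    (by decide : Int.toNat 2 = 2), (by decide : Int.toNat 1 = 1),
    (by decide : Int.toNat 0 = 0)]
  split_ifs <;> first | rfl | omega

-- ===== VERDICT (by name: the statement is the Claim_ definition above) =====
theorem letra_maxima_para_nivel_py_spec : Claim_equal_letra_maxima_para_nivel_py := by
  intro n _ hpre
  unfold Spec_letra_maxima_para_nivel_py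
  rw [pvA_eval n hpre, pvB_eval n hpre]
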